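-- pv_equiv track=rewrite | github.com/jinit24/Scrabble-bot | og_bot_1.py | get_word_on_bottom
-- ===== SOURCE A (Python) =====
-- def get_word_on_bottom(board, start_point):
--
-- 	x,y = start_point
-- 	s = ""
--
-- 	for i in range(x, 15):
-- 		if(board[i][y] == " "):
-- 			break
-- 		else:
-- 			s  = s + board[i][y]
--
-- 	return s
--
-- board =  [[" " for x in range(15)] for y in range(15)]
-- ===== SOURCE B (Python) =====
-- def get_word_on_bottom(board, start_point):
-- 	x, y = start_point
--
-- 	def go(i):
-- 		if i >= 15:
-- 			return ""
-- 		c = board[i][y]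
-- 		if c == " ":
-- 			return ""
-- 		return c + go(i + 1)
--
-- 	return go(x)
-- ===== Notes on version B (the rewrite author's own statement) =====
-- stated objective: alternative
-- what changed: Replaces the iterative accumulate-with-break loop by a recursive helper that builds the word back-to-front (c + go(i+1)) with the stopping conditions as base cases, eliminating the mutable accumulator and the break.
import Mathlib
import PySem

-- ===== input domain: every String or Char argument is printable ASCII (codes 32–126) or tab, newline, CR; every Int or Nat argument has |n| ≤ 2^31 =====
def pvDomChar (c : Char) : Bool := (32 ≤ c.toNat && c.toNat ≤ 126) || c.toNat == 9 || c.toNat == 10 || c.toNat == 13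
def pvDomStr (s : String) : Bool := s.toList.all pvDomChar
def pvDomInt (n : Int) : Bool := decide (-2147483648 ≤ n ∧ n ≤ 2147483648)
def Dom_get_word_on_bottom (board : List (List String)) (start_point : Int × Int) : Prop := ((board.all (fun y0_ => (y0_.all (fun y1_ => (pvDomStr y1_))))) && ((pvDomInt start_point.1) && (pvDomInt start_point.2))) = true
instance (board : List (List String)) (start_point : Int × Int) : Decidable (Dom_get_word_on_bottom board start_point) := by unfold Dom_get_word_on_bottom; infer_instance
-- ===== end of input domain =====

-- ===== PORT A =====
-- B differs from A by decomposition: recursive back-to-front construction instead of an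
-- iterative accumulate-with-break loop (objective: alternative; same cost).
-- board[i][y] (Python semantics: negative indices wrap, out of range = IndexError = none)
def pvCell (board : List (List String)) (y i : Int) : Option String :=
  match PySem.List.pyGet? board i with
  | some row => PySem.List.pyGet? row y
  | none => none

-- A's loop: for i in range(x,15): if board[i][y]==" ": break else s = s + board[i][y]
-- (the 'none' branch is an IndexError in Python; such inputs are excluded by Pre_)
def pvGoA (board : List (List String)) (y : Int) : List Int → String → String
  | [], s => s
  | i :: rest, s =>
    match pvCell board y i with
    | none => s
    | some c => if c = " " then s else pvGoA board y rest (s ++ c)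

def get_word_on_bottom (board : List (List String)) (start_point : Int × Int) : String :=
  pvGoA board start_point.2 (PySem.List.pyRange start_point.1 15 1) ""

-- ===== PORT B =====
-- B's recursive helper go(i): base cases i >= 15 or a space, else c + go(i+1)
def pvGoB (board : List (List String)) (y : Int) (i : Int) : String :=
  if 15 ≤ i then ""
  else
    match pvCell board y i with
    | none => ""  -- IndexError in Python; excluded by Pre_
    | some c => if c = " " then "" else c ++ pvGoB board y (i + 1)
termination_by (15 - i).toNat
decreasing_by omega

def get_word_on_bottom_alt (board : List (List String)) (start_point : Int × Int) : String :=
  pvGoB board start_point.2 start_point.1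

-- ===== PRECONDITION & SPEC =====
-- Pre_: the Python raises IndexError exactly when some i in range(x,15) has board[i][y]
-- out of range and no earlier cell in the range is " " (which would have broken the loop first).
def Pre_get_word_on_bottom (board : List (List String)) (start_point : Int × Int) : Prop :=
  ∀ i ∈ PySem.List.pyRange start_point.1 15 1,
    pvCell board start_point.2 i ≠ none ∨
      ∃ j ∈ PySem.List.pyRange start_point.1 i 1, pvCell board start_point.2 j = some " "
instance (board : List (List String)) (start_point : Int × Int) : Decidable (Pre_get_word_on_bottom board start_point) := by unfold Pre_get_word_on_bottom; infer_instance

def pvWitness_get_word_on_bottom : List (List String) × (Int × Int) := ([["a"], [" "]], (0, 0))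

def Spec_get_word_on_bottom (board : List (List String)) (start_point : Int × Int) (out : String) : Prop := out = get_word_on_bottom_alt board start_point
instance (board : List (List String)) (start_point : Int × Int) (out : String) : Decidable (Spec_get_word_on_bottom board start_point out) := by unfold Spec_get_word_on_bottom; infer_instance

-- ===== CLAIM (what is proved, stated in full; the proofs are below) =====
def Claim_equal_get_word_on_bottom : Prop := ∀ (board : List (List String)) (start_point : Int × Int), Dom_get_word_on_bottom board start_point → Pre_get_word_on_bottom board start_point → Spec_get_word_on_bottom board start_point (get_word_on_bottom board start_point)

-- ===== LEMMAS AND PROOFS =====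
theorem pvGoA_eq_pvGoB (board : List (List String)) (y : Int) :
    ∀ (n : Nat) (i : Int) (s : String), (15 - i).toNat = n →
      pvGoA board y (PySem.List.pyRange i 15 1) s = s ++ pvGoB board y i := by
  intro n
  induction n with
  | zero =>
    intro i s h
    have hge : (15 : Int) ≤ i := by omega
    rw [PySem.List.pyRange_one_eq_nil hge, pvGoB, if_pos hge]
    simp [pvGoA]
  | succ n ih =>
    intro i s h
    have hlt : i < 15 := by omega
    rw [PySem.List.pyRange_one_cons hlt, pvGoB, if_neg (by omega : ¬ (15 : Int) ≤ i)]
    unfold pvGoA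
    cases hc : pvCell board y i with
    | none => simp
    | some c =>
      by_cases hsp : c = " "
      · simp [hsp]
      · simp only [hsp, ite_false]
        rw [ih (i + 1) (s ++ c) (by omega)]
        simp [String.append_assoc]

-- ===== VERDICT (by name: the statement is the Claim_ definition above) =====
theorem get_word_on_bottom_spec : Claim_equal_get_word_on_bottom := by
  intro board sp _ _
  unfold Spec_get_word_on_bottom get_word_on_bottom get_word_on_bottom_alt
  have h := pvGoA_eq_pvGoB board sp.2 (15 - sp.1).toNat sp.1 "" rfl
  simpa using h
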